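-- pv_equiv track=rewrite | github.com/MrBrantCode/unitest_baseline | mut_generate/mist_train_taco/taco_19308/solution.py | can_build_from_substrings
-- ===== SOURCE A (Python) =====
-- def can_build_from_substrings(s: str) -> str:
--     """
--     Determines whether the string `s` can be built from the substrings "aa", "aaa", "bb", and "bbb".
--
--     Parameters:
--     s (str): The string to be checked.
--
--     Returns:
--     str: "YES" if the string can be built, otherwise "NO".
--     """
--     if len(s) < 2:
--         return 'NO'
--
--     arr = []
--     curr = 1
--     last = s[0]
--
--     for i in range(1, len(s)):
--         if s[i] == last:
--             curr += 1
--         else: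
--             arr.append(curr)
--             curr = 1
--             last = s[i]
--     arr.append(curr)
--
--     for count in arr:
--         if count < 2:
--             return 'NO'
--
--     return 'YES'
-- ===== SOURCE B (Python) =====
-- def can_build_from_substrings(s: str) -> str:
--     if len(s) < 2:
--         return 'NO'
--     n = len(s)
--     for i in range(n):
--         if not ((i > 0 and s[i] == s[i - 1]) or (i < n - 1 and s[i] == s[i + 1])):
--             return 'NO'
--     return 'YES'
-- ===== Notes on version B (the rewrite author's own statement) =====
-- stated objective: alternative
-- what changed: B replaces A's run-length accumulation (build the full list of run lengths, then scan it for a count below 2) with a stateless local neighbor test: a character forms a length-1 run exactly when it differs from both neighbors, so B checks each position against its two neighbors, keeps no run state, and rejects at the first isolated character instead of after building the whole list.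
import Mathlib
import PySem

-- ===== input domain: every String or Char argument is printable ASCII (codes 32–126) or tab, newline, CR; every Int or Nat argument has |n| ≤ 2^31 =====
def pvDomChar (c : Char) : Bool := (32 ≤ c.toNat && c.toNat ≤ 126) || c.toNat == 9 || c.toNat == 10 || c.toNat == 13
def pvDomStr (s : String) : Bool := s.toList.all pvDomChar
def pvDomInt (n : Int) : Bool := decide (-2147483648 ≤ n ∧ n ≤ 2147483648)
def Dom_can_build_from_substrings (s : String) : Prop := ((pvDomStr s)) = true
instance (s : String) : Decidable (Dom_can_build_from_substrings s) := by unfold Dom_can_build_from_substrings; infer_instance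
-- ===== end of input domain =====

-- B replaces A's run-length accumulation (build a list of run lengths, then scan it)
-- with a stateless local test: each character must equal one of its neighbors (objective: alternative).

-- ===== PORT A =====
-- the for-loop of A: state (arr, curr, last), appending a finished run length on each change
def pvLoopA (last : Char) (curr : Nat) (arr : List Nat) : List Char → List Nat
  | [] => arr ++ [curr]
  | c :: rest =>
    if c == last then pvLoopA last (curr + 1) arr rest
    else pvLoopA c 1 (arr ++ [curr]) rest

def can_build_from_substrings (s : String) : String :=
  if s.toList.length < 2 then "NO"
  else
    match s.toList with
    | [] => "NO"  -- unreachable under the length guard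
    | c :: rest =>
      -- arr := the accumulated run lengths; then:
      -- 'for count in arr: if count < 2: return NO' then 'return YES'
      if (pvLoopA c 1 [] rest).any (fun count => count < 2) then "NO" else "YES"

-- ===== PORT B =====
-- B's loop-body condition '(i > 0 and s[i] == s[i-1]) or (i < n-1 and s[i] == s[i+1])';
-- the neighbor accesses s[i-1]/s[i+1] are guarded, so getD's default is never the result
def pvNb (l : List Char) (i : Nat) : Bool :=
  (decide (0 < i) && (l.getD i ' ' == l.getD (i - 1) ' ')) ||
  (decide (i < l.length - 1) && (l.getD i ' ' == l.getD (i + 1) ' '))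

-- the 'for i in range(n): if not (...): return NO' loop, then 'return YES'
def can_build_from_substrings_alt (s : String) : String :=
  if s.toList.length < 2 then "NO"
  else if (List.range s.toList.length).all (fun i => pvNb s.toList i) then "YES" else "NO"

-- ===== PRECONDITION & SPEC =====
def Spec_can_build_from_substrings (s : String) (out : String) : Prop := out = can_build_from_substrings_alt s
instance (s : String) (out : String) : Decidable (Spec_can_build_from_substrings s out) := by unfold Spec_can_build_from_substrings; infer_instance

-- ===== CLAIM (what is proved, stated in full; the proofs are below) =====
def Claim_equal_can_build_from_substrings : Prop := ∀ (s : String), Dom_can_build_from_substrings s → Spec_can_build_from_substrings s (can_build_from_substrings s)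

-- ===== LEMMAS AND PROOFS =====

-- all runs of the run decomposition have length ≥ 2 (common characterisation of both ports)
def pvGood : List Char → Bool
  | [] => true
  | c :: rest =>
    (decide (2 ≤ (rest.takeWhile (fun d => d == c)).length + 1)) &&
      pvGood (rest.dropWhile (fun d => d == c))
termination_by l => l.length
decreasing_by
  simpa using Nat.lt_succ_of_le (List.length_dropWhile_le _ _)

-- ---- A-side: the accumulated run lengths all ≥ 2 iff pvGood ----

theorem pvLoopA_append (last : Char) (curr : Nat) (arr : List Nat) (l : List Char) :
    pvLoopA last curr arr l = arr ++ pvLoopA last curr [] l := by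
  induction l generalizing last curr arr with
  | nil => simp [pvLoopA]
  | cons c rest ih =>
    by_cases h : (c == last) = true
    · rw [pvLoopA, pvLoopA, if_pos h, if_pos h, ih, ih last (curr+1) []]
    · rw [pvLoopA, pvLoopA, if_neg h, if_neg h, ih c 1 (arr ++ [curr]), ih c 1 ([] ++ [curr])]
      simp

theorem pvLoopA_all (l : List Char) (last : Char) (curr : Nat) :
    (pvLoopA last curr [] l).all (fun n => 2 ≤ n) =
      ((decide (2 ≤ curr + (l.takeWhile (fun d => d == last)).length)) &&
        pvGood (l.dropWhile (fun d => d == last))) := by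
  induction l generalizing last curr with
  | nil => simp [pvLoopA, pvGood]
  | cons c rest ih =>
    by_cases h : (c == last) = true
    · rw [pvLoopA, if_pos h]
      rw [List.takeWhile_cons_of_pos (p := fun d => d == last) h,
          List.dropWhile_cons_of_pos (p := fun d => d == last) h]
      rw [ih]
      have : curr + 1 + (rest.takeWhile (fun d => d == last)).length
           = curr + ((rest.takeWhile (fun d => d == last)).length + 1) := by omega
      rw [this]
      rfl
    · rw [pvLoopA, if_neg h, pvLoopA_append]
      rw [List.takeWhile_cons_of_neg (p := fun d => d == last) h,
          List.dropWhile_cons_of_neg (p := fun d => d == last) h]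
      simp only [List.all_append, List.all_cons, List.all_nil, Bool.and_true]
      rw [ih, pvGood]
      have : (rest.takeWhile (fun d => d == c)).length + 1
           = 1 + (rest.takeWhile (fun d => d == c)).length := by omega
      simp [this]

theorem pvAny_lt_eq_not_all (arr : List Nat) :
    arr.any (fun count => count < 2) = ! arr.all (fun n => 2 ≤ n) := by
  induction arr with
  | nil => simp
  | cons a l ih =>
    simp only [List.any_cons, List.all_cons, Bool.not_and, ih]
    have : decide (a < 2) = ! decide (2 ≤ a) := by
      by_cases h : a < 2
      · simp [h]
      · simp [h]; omega
    rw [this]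

-- ---- B-side: the neighbor test over all indices iff pvGood ----

theorem pvBeq_comm (a b : Char) : (a == b) = (b == a) := by
  by_cases h : a = b
  · simp [h]
  · simp [h, Ne.symm h]

theorem pvAll_congr (f g : Nat → Bool) (l : List Nat) (h : ∀ x ∈ l, f x = g x) :
    l.all f = l.all g := by
  induction l with
  | nil => rfl
  | cons a t ih =>
    simp only [List.all_cons]
    rw [h a (by simp), ih (fun x hx => h x (by simp [hx]))]

theorem pvGetD_left (t r : List Char) (m : Nat) (hm : m < t.length) :
    (t ++ r).getD m ' ' = t.getD m ' ' := by
  simp [List.getD_eq_getElem?_getD, List.getElem?_append_left hm]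

theorem pvGetD_right (t r : List Char) (m : Nat) :
    (t ++ r).getD (t.length + m) ' ' = r.getD m ' ' := by
  simp [List.getD_eq_getElem?_getD,
    List.getElem?_append_right (Nat.le_add_right t.length m)]

-- shifting the neighbor test past a prefix whose last element differs from r's head
theorem pvNb_append (t r : List Char) (j : Nat) (ht : t ≠ []) (hj : j < r.length)
    (hne : (r.getD 0 ' ' == t.getD (t.length - 1) ' ') = false) :
    pvNb (t ++ r) (t.length + j) = pvNb r j := by
  have hk : 0 < t.length := List.length_pos_of_ne_nil ht
  unfold pvNb
  have hlen : (t ++ r).length = t.length + r.length := List.length_append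
  have hcur : (t ++ r).getD (t.length + j) ' ' = r.getD j ' ' := pvGetD_right t r j
  have hnext : (t ++ r).getD (t.length + j + 1) ' ' = r.getD (j + 1) ' ' := by
    have e : t.length + j + 1 = t.length + (j + 1) := by omega
    rw [e, pvGetD_right t r (j + 1)]
  have hrb : decide (t.length + j < (t ++ r).length - 1) = decide (j < r.length - 1) := by
    rw [hlen]; by_cases h : j < r.length - 1
    · simp [h]; omega
    · have h2 : ¬ (t.length + j < t.length + r.length - 1) := by omega
      simp [h, h2]
  rcases Nat.eq_zero_or_pos j with hj0 | hjpos
  · subst hj0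
    have hprev : (t ++ r).getD (t.length + 0 - 1) ' ' = t.getD (t.length - 1) ' ' := by
      have e : t.length + 0 - 1 = t.length - 1 := by omega
      rw [e, pvGetD_left t r _ (by omega)]
    rw [hprev, hcur, hnext, hrb, hne]
    simp
  · have hprev : (t ++ r).getD (t.length + j - 1) ' ' = r.getD (j - 1) ' ' := by
      have e : t.length + j - 1 = t.length + (j - 1) := by omega
      rw [e, pvGetD_right t r (j - 1)]
    rw [hprev, hcur, hnext, hrb]
    have e1 : decide (0 < t.length + j) = true := by simp; omega
    have e2 : decide (0 < j) = true := by simp [hjpos]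
    rw [e1, e2]

-- the first run c :: take (every element of take equals c, drop starts differently):
-- its indices all pass the neighbor test iff its length is ≥ 2
theorem pvNb_head (c : Char) (tk dp : List Char)
    (hall : ∀ x ∈ tk, (x == c) = true)
    (hdrop : ∀ b bs, dp = b :: bs → (b == c) = false) :
    (List.range (tk.length + 1)).all (fun j => pvNb ((c :: tk) ++ dp) j)
      = decide (2 ≤ tk.length + 1) := by
  have hval : ∀ j, j < tk.length + 1 → ((c :: tk) ++ dp).getD j ' ' = c := by
    intro j hj
    rw [pvGetD_left (c :: tk) dp j (by simpa using hj)]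
    match j with
    | 0 => rfl
    | Nat.succ m =>
      have hm : m < tk.length := by omega
      have h1 : (c :: tk).getD (m + 1) ' ' = tk.getD m ' ' := rfl
      rw [h1, List.getD_eq_getElem tk ' ' hm]
      exact eq_of_beq (hall _ (tk.getElem_mem hm))
  by_cases h2 : 2 ≤ tk.length + 1
  · rw [decide_eq_true h2, List.all_eq_true]
    intro j hj
    have hj' : j < tk.length + 1 := List.mem_range.mp hj
    rcases Nat.eq_zero_or_pos j with hj0 | hjpos
    · subst hj0
      unfold pvNb
      have hr : decide (0 < ((c :: tk) ++ dp).length - 1) = true := by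
        simp [List.length_append]; omega
      have h1 : (0:Nat) + 1 = 1 := rfl
      have h0 : (0:Nat) - 1 = 0 := rfl
      rw [h1, h0, hval 0 (by omega), hval 1 (by omega), hr]
      simp
    · unfold pvNb
      have ha := hval j hj'
      have hb := hval (j - 1) (by omega)
      rw [ha, hb]
      simp [hjpos]
  · have htk : tk = [] := by
      cases tk with
      | nil => rfl
      | cons a l => simp at h2
    subst htk
    have hdec : decide (2 ≤ ([] : List Char).length + 1) = false := by simp
    rw [hdec]
    simp only [List.length_nil, Nat.zero_add, List.range_one, List.all_cons, List.all_nil,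
      Bool.and_true]
    cases dp with
    | nil => simp [pvNb]
    | cons b bs =>
      have hb : (b == c) = false := hdrop b bs rfl
      have hcb : (c == b) = false := by rw [pvBeq_comm]; exact hb
      simp [pvNb, hcb]

theorem range_all_pvNb (l : List Char) :
    (List.range l.length).all (fun i => pvNb l i) = pvGood l := by
  induction l using pvGood.induct with
  | case1 => simp [pvGood]
  | case2 c rest ih =>
    rw [pvGood]
    have hsplit : c :: rest
        = (c :: rest.takeWhile (fun d => d == c)) ++ rest.dropWhile (fun d => d == c) := by
      simp [List.takeWhile_append_dropWhile]
    have hrl : rest.length = (rest.takeWhile (fun d => d == c)).length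
          + (rest.dropWhile (fun d => d == c)).length := by
      conv_lhs => rw [← List.takeWhile_append_dropWhile (p := fun d => d == c) (l := rest)]
      rw [List.length_append]
    have hlen : (c :: rest).length
        = ((rest.takeWhile (fun d => d == c)).length + 1)
          + (rest.dropWhile (fun d => d == c)).length := by
      simp only [List.length_cons, hrl]; omega
    rw [hlen, List.range_add, List.all_append, List.all_map]
    have hfirst :
        (List.range ((rest.takeWhile (fun d => d == c)).length + 1)).all
          (fun i => pvNb (c :: rest) i)
        = decide (2 ≤ (rest.takeWhile (fun d => d == c)).length + 1) := by
      conv_lhs => rw [hsplit]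
      exact pvNb_head c _ _
        (fun x hx => by simpa using List.mem_takeWhile_imp (p := fun d => d == c) hx)
        (fun b bs hb => by
          have hne : rest.dropWhile (fun d => d == c) ≠ [] := by simp [hb]
          have h2 := List.head_dropWhile_not (l := rest) (fun d => d == c) hne
          have h3 : (rest.dropWhile (fun d => d == c)).head hne = b := by simp [hb]
          rwa [h3] at h2)
    have hsecond :
        (List.range (rest.dropWhile (fun d => d == c)).length).all
          ((fun i => pvNb (c :: rest) i) ∘
            (fun x => (rest.takeWhile (fun d => d == c)).length + 1 + x))
        = (List.range (rest.dropWhile (fun d => d == c)).length).all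
            (fun i => pvNb (rest.dropWhile (fun d => d == c)) i) := by
      apply pvAll_congr
      intro j hj
      have hj' : j < (rest.dropWhile (fun d => d == c)).length := List.mem_range.mp hj
      simp only [Function.comp]
      have hte : (c :: rest.takeWhile (fun d => d == c)).length
          = (rest.takeWhile (fun d => d == c)).length + 1 := by simp
      conv_lhs => rw [hsplit]
      rw [← hte]
      apply pvNb_append
      · simp
      · exact hj'
      · -- the head of drop differs from the last element of the first run
        cases hd : rest.dropWhile (fun d => d == c) with
        | nil => rw [hd] at hj'; simp at hj'
        | cons b bs =>
          have hne : rest.dropWhile (fun d => d == c) ≠ [] := by simp [hd]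
          have h2 := List.head_dropWhile_not (l := rest) (fun d => d == c) hne
          have h3 : (rest.dropWhile (fun d => d == c)).head hne = b := by simp [hd]
          rw [h3] at h2
          -- last element of c :: take is c
          have hlast : (c :: rest.takeWhile (fun d => d == c)).getD
              ((c :: rest.takeWhile (fun d => d == c)).length - 1) ' ' = c := by
            cases htk : rest.takeWhile (fun d => d == c) with
            | nil => rfl
            | cons a as =>
              have hall' : ∀ x ∈ a :: as, (x == c) = true := by
                intro x hx
                have hx' : x ∈ rest.takeWhile (fun d => d == c) := by rw [htk]; exact hx
                simpa using List.mem_takeWhile_imp (p := fun d => d == c) hx'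
              have hm : as.length < (a :: as).length := by simp
              have h1 : (c :: a :: as).getD (as.length + 1) ' ' = (a :: as).getD as.length ' ' := rfl
              simp only [List.length_cons, Nat.add_sub_cancel, h1,
                List.getD_eq_getElem (a :: as) ' ' hm]
              exact eq_of_beq (hall' _ (List.getElem_mem hm))
          rw [hlast]
          simpa using h2
    rw [hfirst, hsecond, ih]

-- ===== VERDICT (by name: the statement is the Claim_ definition above) =====
theorem can_build_from_substrings_spec : Claim_equal_can_build_from_substrings := by
  intro s _
  unfold Spec_can_build_from_substrings can_build_from_substrings can_build_from_substrings_alt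
  by_cases hlen : s.toList.length < 2
  · rw [if_pos hlen, if_pos hlen]
  · rw [if_neg hlen, if_neg hlen, range_all_pvNb]
    rcases hl : s.toList with _ | ⟨c, rest⟩
    · rw [hl] at hlen; simp at hlen
    · rw [pvGood]
      simp only [pvAny_lt_eq_not_all, pvLoopA_all]
      have : (1 : Nat) + (rest.takeWhile (fun d => d == c)).length
           = (rest.takeWhile (fun d => d == c)).length + 1 := by omega
      rw [this]
      cases hg : ((decide (2 ≤ (rest.takeWhile (fun d => d == c)).length + 1)) &&
          pvGood (rest.dropWhile (fun d => d == c)))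
      · simp
      · simp
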